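-- pv_equiv track=rewrite | github.com/raeez/chiral-bar-cobar | compute/lib/arithmetic_conductor_spectrum_engine.py | conductor_stabilizes_at
-- ===== SOURCE A (Python) =====
-- from typing import Any, Dict, List, Optional, Set, Tuple, Union
--
-- def conductor_stabilizes_at(conductor_seq: Dict[int, int]) -> Optional[int]:
--     """Return the smallest R such that N_R = N_{R'} for all R' >= R, or None."""
--     Rs = sorted(conductor_seq.keys())
--     if len(Rs) < 2:
--         return Rs[0] if Rs else None
--
--     final_val = conductor_seq[Rs[-1]]
--     # Check from the beginning: first R where N_R = final_val
--     for R in Rs: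
--         if conductor_seq[R] == final_val:
--             # Verify all subsequent are the same
--             if all(conductor_seq[R2] == final_val for R2 in Rs if R2 >= R):
--                 return R
--     return None
-- ===== SOURCE B (Python) =====
-- def conductor_stabilizes_at(conductor_seq):
--     """Return the smallest R such that N_R = N_{R'} for all R' >= R, or None."""
--     Rs = sorted(conductor_seq.keys())
--     if not Rs:
--         return None
--     rev = Rs[::-1]
--     ans = rev[0]
--     final_val = conductor_seq[ans]
--     for R in rev[1:]:
--         if conductor_seq[R] != final_val:
--             break
--         ans = R
--     return ans
-- ===== Notes on version B (the rewrite author's own statement) =====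
-- stated objective: faster
-- what changed: A searches forward for the first key whose value equals the final value and re-scans the whole remaining tail at each candidate (quadratic); B makes one backward pass from the largest key, extending the final constant run until a value differs.
import Mathlib
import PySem

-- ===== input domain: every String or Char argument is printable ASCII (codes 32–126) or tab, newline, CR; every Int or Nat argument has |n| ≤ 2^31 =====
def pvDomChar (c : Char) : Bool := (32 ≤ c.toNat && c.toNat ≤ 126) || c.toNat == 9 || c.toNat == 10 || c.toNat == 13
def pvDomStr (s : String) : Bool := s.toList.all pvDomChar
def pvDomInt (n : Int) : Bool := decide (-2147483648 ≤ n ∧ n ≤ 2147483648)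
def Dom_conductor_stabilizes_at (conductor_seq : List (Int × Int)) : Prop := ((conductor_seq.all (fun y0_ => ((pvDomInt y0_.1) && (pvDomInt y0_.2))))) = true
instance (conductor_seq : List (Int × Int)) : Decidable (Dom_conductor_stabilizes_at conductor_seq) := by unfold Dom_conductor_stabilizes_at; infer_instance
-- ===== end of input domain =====

-- B replaces A's quadratic forward search (with an inner re-scan of the whole tail)
-- by a single backward scan from the largest key; objective: faster.

-- ===== PORT A =====
-- 'all(conductor_seq[R2] == final_val for R2 in Rs if R2 >= R)'
def pvAcheck (d : PySem.Dict Int Int) (final R : Int) (allRs : List Int) : Bool :=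
  allRs.all (fun R2 => if R ≤ R2 then d.getD R2 0 == final else true)

-- the 'for R in Rs' loop with its early returns
def pvAloop (d : PySem.Dict Int Int) (final : Int) (allRs : List Int) : List Int → Option Int
  | [] => none
  | R :: rest =>
    if d.getD R 0 == final then
      if pvAcheck d final R allRs then some R
      else pvAloop d final allRs rest
    else pvAloop d final allRs rest

def conductor_stabilizes_at (conductor_seq : List (Int × Int)) : Option Int :=
  let d := PySem.Dict.ofList conductor_seq
  let Rs := PySem.List.sorted d.keys (fun x => x) false
  if Rs.length < 2 then Rs.head?   -- 'return Rs[0] if Rs else None'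
  else
    match PySem.List.pyGet? Rs (-1) with   -- 'Rs[-1]' (always some: Rs is nonempty here)
    | none => none
    | some lastR =>
      -- 'conductor_seq[Rs[-1]]': lastR ∈ keys, so getD is exact here
      pvAloop d (d.getD lastR 0) Rs Rs

-- ===== PORT B =====
-- 'for R in rev[1:]: if conductor_seq[R] != final_val: break; ans = R'
def pvBloop (d : PySem.Dict Int Int) (final ans : Int) : List Int → Int
  | [] => ans
  | R :: rest => if d.getD R 0 != final then ans else pvBloop d final R rest

def conductor_stabilizes_at_alt (conductor_seq : List (Int × Int)) : Option Int :=
  let d := PySem.Dict.ofList conductor_seq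
  let Rs := PySem.List.sorted d.keys (fun x => x) false
  match Rs.reverse with                     -- 'rev = Rs[::-1]; if not Rs: return None'
  | [] => none
  | a :: rest => some (pvBloop d (d.getD a 0) a rest)

-- ===== PRECONDITION & SPEC =====
def Spec_conductor_stabilizes_at (conductor_seq : List (Int × Int)) (out : Option Int) : Prop := out = conductor_stabilizes_at_alt conductor_seq
instance (conductor_seq : List (Int × Int)) (out : Option Int) : Decidable (Spec_conductor_stabilizes_at conductor_seq out) := by unfold Spec_conductor_stabilizes_at; infer_instance

-- ===== CLAIM (what is proved, stated in full; the proofs are below) =====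
def Claim_equal_conductor_stabilizes_at : Prop := ∀ (conductor_seq : List (Int × Int)), Dom_conductor_stabilizes_at conductor_seq → Spec_conductor_stabilizes_at conductor_seq (conductor_stabilizes_at conductor_seq)

-- ===== LEMMAS AND PROOFS =====

-- getLastD through a cons
theorem pvGetLastD_cons {α : Type} (l : List α) (a b : α) :
    (a :: l).getLastD b = l.getLastD a := by
  cases l with
  | nil => rfl
  | cons c t => rfl

-- B's loop returns the last element of the initial run of 'value = final' (default: ans).
theorem pvBloop_eq_takeWhile (d : PySem.Dict Int Int) (final : Int) :
    ∀ (ms : List Int) (ans : Int),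
      pvBloop d final ans ms = (ms.takeWhile (fun R => d.getD R 0 == final)).getLastD ans := by
  intro ms
  induction ms with
  | nil => intro ans; rfl
  | cons R rest ih =>
    intro ans
    by_cases h : d.getD R 0 = final
    · simp only [pvBloop, List.takeWhile_cons, h, bne_self_eq_false, if_pos, beq_self_eq_true,
        Bool.false_eq_true, if_false, ih R]
      exact (pvGetLastD_cons (rest.takeWhile (fun R => d.getD R 0 == final)) R ans).symm
    · simp [pvBloop, h]

-- generic: a takeWhile that stops strictly inside l ignores any appended tail
theorem takeWhile_append_of_ne {α : Type} (p : α → Bool) :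
    ∀ (l l' : List α), l.takeWhile p ≠ l → (l ++ l').takeWhile p = l.takeWhile p := by
  intro l
  induction l with
  | nil => intro l' h; exact absurd rfl h
  | cons x t ih =>
    intro l' h
    by_cases hx : p x = true
    · simp only [List.cons_append, List.takeWhile_cons, hx, if_true] at *
      have ht : t.takeWhile p ≠ t := fun he => h (by simp [he])
      simp [ih l' ht]
    · simp [hx]

-- first element of L whose whole suffix has value = final (the common spec)
def pvFirstRun (d : PySem.Dict Int Int) (final : Int) : List Int → Option Int
  | [] => none
  | x :: t => if (x :: t).all (fun R => d.getD R 0 == final) then some x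
              else pvFirstRun d final t

-- A's loop, on a sorted suffix S of its full list L, computes pvFirstRun S
theorem pvAloop_eq_firstRun (d : PySem.Dict Int Int) (final : Int) (L : List Int)
    (hL : L.Pairwise (· < ·)) :
    ∀ (S P : List Int), L = P ++ S → pvAloop d final L S = pvFirstRun d final S := by
  intro S
  induction S with
  | nil => intro P h; rfl
  | cons x t ih =>
    intro P hLPS
    have hcheck : pvAcheck d final x L = (x :: t).all (fun R => d.getD R 0 == final) := by
      subst hLPS
      unfold pvAcheck
      rw [List.all_append]
      have hP : P.all (fun R2 => if x ≤ R2 then d.getD R2 0 == final else true) = true := by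
        rw [List.all_eq_true]
        intro R2 hR2
        have hlt : R2 < x := (List.pairwise_append.1 hL).2.2 R2 hR2 x (by simp)
        simp [not_le.2 hlt]
      rw [hP, Bool.true_and]
      have hxle : ∀ R2 ∈ (x :: t), x ≤ R2 := by
        intro R2 hR2
        rcases List.mem_cons.1 hR2 with h | h
        · exact le_of_eq h.symm
        · exact le_of_lt ((List.pairwise_cons.1 (List.pairwise_append.1 hL).2.1).1 R2 h)
      rw [Bool.eq_iff_iff, List.all_eq_true, List.all_eq_true]
      constructor
      · intro h R2 hR2; have := h R2 hR2; rwa [if_pos (hxle R2 hR2)] at this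
      · intro h R2 hR2; rw [if_pos (hxle R2 hR2)]; exact h R2 hR2
    unfold pvAloop pvFirstRun
    rw [hcheck]
    have ih' := ih (P ++ [x]) (by simp [hLPS])
    by_cases hall : (x :: t).all (fun R => d.getD R 0 == final) = true
    · have hx : (d.getD x 0 == final) = true := by
        rw [List.all_eq_true] at hall; exact hall x (by simp)
      simp [hx, hall]
    · rw [Bool.not_eq_true] at hall
      by_cases hx : (d.getD x 0 == final) = true
      · simp [hx, hall, ih']
      · have hx' : (d.getD x 0 == final) = false := Bool.eq_false_iff.2 hx
        simp [hx', hall, ih']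

-- pvFirstRun on a list whose last element has value final equals B's backward run start
theorem pvFirstRun_eq_back (d : PySem.Dict Int Int) (final : Int) :
    ∀ (L : List Int) (a : Int) (rest : List Int),
      L.reverse = a :: rest → d.getD a 0 = final →
      pvFirstRun d final L =
        some ((rest.takeWhile (fun R => d.getD R 0 == final)).getLastD a) := by
  intro L
  induction L with
  | nil => intro a rest h; simp at h
  | cons x t ih =>
    intro a rest hrev hfa
    cases t with
    | nil =>
      simp at hrev
      obtain ⟨ha, hr⟩ := hrev
      subst ha; subst hr
      simp [pvFirstRun, hfa]
    | cons y t' =>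
      -- (y :: t').reverse is nonempty: (x :: y :: t').reverse = (y::t').reverse ++ [x]
      obtain ⟨b, rest', hrev'⟩ := List.exists_cons_of_ne_nil
        (show (y :: t').reverse ≠ [] by simp)
      have hsplit : a = b ∧ rest = rest' ++ [x] := by
        have : (x :: y :: t').reverse = (y :: t').reverse ++ [x] := by simp
        rw [hrev, hrev'] at this
        have := this.symm
        simp at this
        exact ⟨this.1.symm, this.2.symm⟩
      obtain ⟨hab, hrr⟩ := hsplit
      subst hab; subst hrr
      have ih' := ih a rest' hrev' hfa
      -- membership: elements of y :: t' are rest' ∪ {a}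
      have hmem : ∀ z, z ∈ (y :: t') ↔ z ∈ a :: rest' := by
        intro z
        constructor
        · intro hz; rw [← List.mem_reverse, hrev'] at hz; exact hz
        · intro hz; rw [← List.mem_reverse, hrev']; exact hz
      unfold pvFirstRun
      by_cases hall : (x :: y :: t').all (fun R => d.getD R 0 == final) = true
      · -- whole list constant: takeWhile of rest' ++ [x] is everything, last is x
        rw [if_pos hall]
        rw [List.all_eq_true] at hall
        have htw : (rest' ++ [x]).takeWhile (fun R => d.getD R 0 == final) = rest' ++ [x] := by
          rw [List.takeWhile_eq_self_iff]   -- may need adjustment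
          intro z hz
          rcases List.mem_append.1 hz with h | h
          · exact hall z (by simp [(hmem z).2 (by simp [h])])
          · simp at h; subst h; exact hall z (by simp)
        rw [htw]
        simp
      · rw [if_neg hall]
        rw [ih']
        congr 1
        by_cases hrest : rest'.takeWhile (fun R => d.getD R 0 == final) = rest'
        · -- all of rest' constant, hence all of y::t' constant, so p x must fail
          have hallt : ∀ z ∈ (y :: t'), (d.getD z 0 == final) = true := by
            intro z hz
            rcases List.mem_cons.1 ((hmem z).1 hz) with h | h
            · subst h; simp [hfa]
            · have := List.mem_takeWhile_imp (l := rest') (p := fun R => d.getD R 0 == final)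
                (x := z) (by rw [hrest]; exact h)
              exact this
          have hx : (d.getD x 0 == final) = false := by
            rw [Bool.eq_false_iff]
            intro hx
            apply hall
            rw [List.all_eq_true]
            intro z hz
            rcases List.mem_cons.1 hz with h | h
            · subst h; exact hx
            · exact hallt z h
          rw [List.takeWhile_append]
          simp [hrest, hx]
        · rw [takeWhile_append_of_ne _ _ _ hrest]

-- Rs is strictly increasing
theorem sortedKeys_pairwise_lt (d : PySem.Dict Int Int) (hnd : d.keys.Nodup) :
    (PySem.List.sorted d.keys (fun x => x) false).Pairwise (· < ·) := by
  have hnd' : (PySem.List.sorted d.keys (fun x => x) false).Nodup :=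
    (PySem.List.sorted_perm _ _ _).nodup_iff.2 hnd
  have hle := PySem.List.sorted_pairwise d.keys (fun x => x)
  exact (hle.and hnd').imp (fun h => lt_of_le_of_ne h.1 h.2)

-- the whole bodies agree for any dict with distinct keys
theorem pvMain (d : PySem.Dict Int Int) (hnd : d.keys.Nodup) :
    (if (PySem.List.sorted d.keys (fun x => x) false).length < 2 then
        (PySem.List.sorted d.keys (fun x => x) false).head?
      else
        match PySem.List.pyGet? (PySem.List.sorted d.keys (fun x => x) false) (-1) with
        | none => none
        | some lastR => pvAloop d (d.getD lastR 0)
            (PySem.List.sorted d.keys (fun x => x) false)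
            (PySem.List.sorted d.keys (fun x => x) false))
    = (match (PySem.List.sorted d.keys (fun x => x) false).reverse with
      | [] => none
      | a :: rest => some (pvBloop d (d.getD a 0) a rest)) := by
  have hpw := sortedKeys_pairwise_lt d hnd
  generalize hG : PySem.List.sorted d.keys (fun x => x) false = Rs at hpw ⊢
  by_cases hlen : Rs.length < 2
  · match Rs, hlen with
    | [], _ => simp
    | [x], _ => simp [pvBloop]
  · rw [if_neg hlen]
    obtain ⟨a, rest, hrev⟩ := List.exists_cons_of_ne_nil
      (show Rs.reverse ≠ [] by
        intro h
        rw [List.reverse_eq_nil_iff] at h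
        rw [h] at hlen; simp at hlen)
    rw [hrev]
    have hget : PySem.List.pyGet? Rs (-1) = some a := by
      have hRs : Rs = rest.reverse ++ [a] := by
        have := congrArg List.reverse hrev
        simpa using this
      rw [hRs]
      simp [PySem.List.pyGet?, PySem.List.pyIdx?]
    rw [hget]
    show pvAloop d (d.getD a 0) Rs Rs = some (pvBloop d (d.getD a 0) a rest)
    rw [pvAloop_eq_firstRun d (d.getD a 0) Rs hpw Rs [] rfl]
    rw [pvFirstRun_eq_back d (d.getD a 0) Rs a rest hrev rfl]
    rw [pvBloop_eq_takeWhile]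

-- ===== VERDICT (by name: the statement is the Claim_ definition above) =====
theorem conductor_stabilizes_at_spec : Claim_equal_conductor_stabilizes_at := by
  intro cs _
  unfold Spec_conductor_stabilizes_at conductor_stabilizes_at conductor_stabilizes_at_alt
  exact pvMain (PySem.Dict.ofList cs) (PySem.Dict.nodup_keys_ofList cs)
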